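-- pv_equiv track=rewrite | github.com/channsoden/dancify | dancify/vizualization/callbacks.py | parse_search_terms
-- ===== SOURCE A (Python) =====
-- def parse_search_terms(query):
--     include = []
--     exclude = []
--     mandatory = []
--     for term in query.split(','):
--         term = term.strip()
--         if not term:
--             pass
--         elif term[0] == '-':
--             exclude.append(term[1:])
--         elif term[0] == '+':
--             mandatory.append(term[1:])
--         else:
--             include.append(term)
--
--     return include, exclude, mandatory
-- ===== SOURCE B (Python) =====
-- def parse_search_terms(query):
--     # Single character-level scan: no split()/strip(); a small state machine
--     # tokenizes terms, trims whitespace, and classifies by the leading sign.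
--     include, exclude, mandatory = [], [], []
--     word = []    # committed characters of the current term (sign removed)
--     pend = []    # whitespace seen since the last committed character
--     mode = ''    # '' = no term char seen yet; else 'i', '-' or '+'
--     for ch in query + ',':
--         if ch == ',':
--             if mode == '-':
--                 exclude.append(''.join(word))
--             elif mode == '+':
--                 mandatory.append(''.join(word))
--             elif mode == 'i':
--                 include.append(''.join(word))
--             word, pend, mode = [], [], ''
--         elif ch.isspace():
--             if mode:
--                 pend.append(ch)
--         elif mode:
--             word.extend(pend)
--             pend = []
--             word.append(ch)
--         else:
--             mode = ch if ch in '+-' else 'i'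
--             if mode == 'i':
--                 word.append(ch)
--     return include, exclude, mandatory
-- ===== Notes on version B (the rewrite author's own statement) =====
-- stated objective: alternative
-- what changed: Replaces A's comma-split/strip/classify loop over pieces by a single character-level state machine that tokenizes the query in one scan, trimming whitespace and classifying each term by its leading sign as it goes.
import Mathlib
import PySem

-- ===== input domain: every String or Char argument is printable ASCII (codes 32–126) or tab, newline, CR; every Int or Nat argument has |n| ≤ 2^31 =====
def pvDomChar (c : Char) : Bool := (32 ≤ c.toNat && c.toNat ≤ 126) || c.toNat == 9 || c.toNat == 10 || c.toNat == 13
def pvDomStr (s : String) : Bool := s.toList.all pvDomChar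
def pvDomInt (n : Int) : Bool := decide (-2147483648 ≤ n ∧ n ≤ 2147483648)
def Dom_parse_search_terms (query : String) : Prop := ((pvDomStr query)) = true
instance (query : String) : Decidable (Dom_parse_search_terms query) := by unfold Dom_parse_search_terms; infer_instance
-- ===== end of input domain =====

-- B replaces A's split/strip/classify loop by a single character-level state machine
-- that tokenizes, trims and classifies terms in one scan (objective: alternative).

-- ===== PORT A =====
-- faithful port of query.split on a comma: the separator is non-empty, so split? is always some
def pySplitComma (s : String) : List String := (PySem.Str.split? s ",").getD []

-- one fold over the split pieces, threading the three accumulators exactly as A's for-loop does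
def parse_search_terms (query : String) : List String × List String × List String :=
  (pySplitComma query).foldl
    (fun (acc : List String × List String × List String) term0 =>
      let term := PySem.Str.strip term0
      if term = "" then acc
      else if PySem.Str.pyGet? term 0 = some '-' then
        (acc.1, acc.2.1 ++ [PySem.Str.slice term (some 1) none], acc.2.2)
      else if PySem.Str.pyGet? term 0 = some '+' then
        (acc.1, acc.2.1, acc.2.2 ++ [PySem.Str.slice term (some 1) none])
      else (acc.1 ++ [term], acc.2.1, acc.2.2))
    ([], [], [])

-- ===== PORT B =====
-- B's scanner state: (include, exclude, mandatory), word, pend, mode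
-- word/pend are lists of chars as in Source B; mode is the (possibly empty) string, kept as List Char
def pvBStep (st : (List String × List String × List String) × List Char × List Char × List Char)
    (ch : Char) : (List String × List String × List String) × List Char × List Char × List Char :=
  let acc := st.1; let word := st.2.1; let pend := st.2.2.1; let mode := st.2.2.2
  if ch = ',' then
    ((if mode = ['-'] then (acc.1, acc.2.1 ++ [String.ofList word], acc.2.2)
      else if mode = ['+'] then (acc.1, acc.2.1, acc.2.2 ++ [String.ofList word])
      else if mode = ['i'] then (acc.1 ++ [String.ofList word], acc.2.1, acc.2.2)
      else acc), [], [], [])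
  else if PySem.Chars.isspace ch then
    (acc, word, (if mode ≠ [] then pend ++ [ch] else pend), mode)
  else if mode ≠ [] then
    (acc, word ++ pend ++ [ch], [], mode)
  else
    let m := if ch = '+' ∨ ch = '-' then [ch] else ['i']
    (acc, (if m = ['i'] then word ++ [ch] else word), [], m)

-- single scan of the characters of the query with a trailing separator appended, as in Source B
def parse_search_terms_alt (query : String) : List String × List String × List String :=
  ((query.toList ++ [',']).foldl pvBStep (([], [], []), [], [], [])).1

-- ===== PRECONDITION & SPEC =====
def Spec_parse_search_terms (query : String) (out : List String × List String × List String) : Prop := out = parse_search_terms_alt query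
instance (query : String) (out : List String × List String × List String) : Decidable (Spec_parse_search_terms query out) := by unfold Spec_parse_search_terms; infer_instance

-- ===== CLAIM (what is proved, stated in full; the proofs are below) =====
def Claim_equal_parse_search_terms : Prop := ∀ (query : String), Dom_parse_search_terms query → Spec_parse_search_terms query (parse_search_terms query)

-- ===== LEMMAS AND PROOFS =====

-- abbreviations used only by the proofs
def pvWS : Char → Bool := PySem.Chars.isspace
def pvRstrip (l : List Char) : List Char := (l.reverse.dropWhile pvWS).reverse
def pvWsSuf (l : List Char) : List Char := (l.reverse.takeWhile pvWS).reverse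

-- structural form of query.split(',') on chars
def pvSplit : List Char → List (List Char)
  | [] => [[]]
  | c :: r => if c = ',' then [] :: pvSplit r
              else match pvSplit r with
                   | [] => [[c]]
                   | h :: t => (c :: h) :: t

def pvMapHead (f : List Char → List Char) : List (List Char) → List (List Char)
  | [] => []
  | h :: t => f h :: t

-- the term-state part of B's step (non-comma characters), and the commit at ','
def pvStepT (ts : List Char × List Char × List Char) (ch : Char) : List Char × List Char × List Char :=
  if pvWS ch then (ts.1, (if ts.2.2 ≠ [] then ts.2.1 ++ [ch] else ts.2.1), ts.2.2)
  else if ts.2.2 ≠ [] then (ts.1 ++ ts.2.1 ++ [ch], [], ts.2.2)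
  else
    let m := if ch = '+' ∨ ch = '-' then [ch] else ['i']
    ((if m = ['i'] then ts.1 ++ [ch] else ts.1), [], m)

def pvCommit (acc : List String × List String × List String)
    (ts : List Char × List Char × List Char) : List String × List String × List String :=
  if ts.2.2 = ['-'] then (acc.1, acc.2.1 ++ [String.ofList ts.1], acc.2.2)
  else if ts.2.2 = ['+'] then (acc.1, acc.2.1, acc.2.2 ++ [String.ofList ts.1])
  else if ts.2.2 = ['i'] then (acc.1 ++ [String.ofList ts.1], acc.2.1, acc.2.2)
  else acc

-- A's per-piece step at the char level
def pvAStep (acc : List String × List String × List String) (p : List Char) :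
    List String × List String × List String :=
  let t := PySem.Chars.strip p
  if t = [] then acc
  else if PySem.List.pyGet? t 0 = some '-' then
    (acc.1, acc.2.1 ++ [String.ofList t.tail], acc.2.2)
  else if PySem.List.pyGet? t 0 = some '+' then
    (acc.1, acc.2.1, acc.2.2 ++ [String.ofList t.tail])
  else (acc.1 ++ [String.ofList t], acc.2.1, acc.2.2)

theorem pvBStep_comma (acc : List String × List String × List String)
    (ts : List Char × List Char × List Char) :
    pvBStep (acc, ts) ',' = (pvCommit acc ts, [], [], []) := by
  obtain ⟨w, p, m⟩ := ts
  simp [pvBStep, pvCommit]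

theorem pvBStep_ne (acc : List String × List String × List String)
    (ts : List Char × List Char × List Char) (ch : Char) (h : ch ≠ ',') :
    pvBStep (acc, ts) ch = (acc, pvStepT ts ch) := by
  obtain ⟨w, p, m⟩ := ts
  simp only [pvBStep, pvStepT, pvWS, if_neg h]
  split_ifs <;> rfl

-- splitOn characterization -------------------------------------------------

theorem pvSplit_ne_nil (l : List Char) : pvSplit l ≠ [] := by
  cases l with
  | nil => simp [pvSplit]
  | cons c r =>
    simp only [pvSplit]
    split
    · simp
    · split <;> simp

theorem pvMapHead_id (l : List (List Char)) :
    pvMapHead (fun x => x) l = l := by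
  cases l <;> simp [pvMapHead]

theorem pvSplitOn_go (fuel : Nat) (l cur : List Char) (acc : List (List Char))
    (h : l.length < fuel) :
    PySem.Chars.splitOn.go [','] fuel l cur acc
      = acc.reverse ++ pvMapHead (fun x => cur.reverse ++ x) (pvSplit l) := by
  induction fuel generalizing l cur acc with
  | zero => omega
  | succ fuel ih =>
    cases l with
    | nil => simp [PySem.Chars.splitOn.go, pvSplit, pvMapHead]
    | cons c rest =>
      rw [PySem.Chars.splitOn.go]
      by_cases hc : c = ','
      · subst hc
        have hpre : [','].isPrefixOf (',' :: rest) = true := by simp [List.isPrefixOf]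
        rw [if_pos hpre]
        simp only [List.length_cons, List.drop_succ_cons, List.length_nil, List.drop_zero]
        rw [ih rest [] ((cur.reverse) :: acc) (by simp at h; omega)]
        cases hs : pvSplit rest with
        | nil => exact absurd hs (pvSplit_ne_nil _)
        | cons a b => simp [pvSplit, pvMapHead, hs]
      · have hpre : ¬ ([','].isPrefixOf (c :: rest) = true) := by
          simp [List.isPrefixOf]
          exact fun hh => hc hh.symm
        rw [if_neg hpre]
        rw [ih rest (c :: cur) acc (by simp at h; omega)]
        cases hs : pvSplit rest with
        | nil => exact absurd hs (pvSplit_ne_nil _)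
        | cons a b => simp [pvSplit, pvMapHead, hs, hc]

theorem pvSplitOn_eq (s : List Char) :
    PySem.Chars.splitOn s [','] = pvSplit s := by
  have := pvSplitOn_go (s.length + 1) s [] [] (by omega)
  simpa [PySem.Chars.splitOn, pvMapHead_id] using this

-- whitespace lemmas --------------------------------------------------------

theorem pvRstrip_all_ws {l : List Char} (h : l.all pvWS) : pvRstrip l = [] := by
  have : l.reverse.dropWhile pvWS = [] := by
    rw [List.dropWhile_eq_nil_iff]
    intro x hx
    exact (List.all_eq_true.mp h) x (List.mem_reverse.mp hx)
  simp [pvRstrip, this]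

theorem pvWsSuf_all_ws {l : List Char} (h : l.all pvWS) : pvWsSuf l = l := by
  have : l.reverse.takeWhile pvWS = l.reverse := by
    rw [List.takeWhile_eq_self_iff]
    intro x hx
    exact (List.all_eq_true.mp h) x (List.mem_reverse.mp hx)
  simp [pvWsSuf, this]

theorem pvRstrip_append_cons {c : Char} (hc : ¬ pvWS c) (x r : List Char) :
    pvRstrip (x ++ c :: r) = x ++ c :: pvRstrip r := by
  unfold pvRstrip
  rw [List.reverse_append, List.reverse_cons, List.append_assoc, List.dropWhile_append]
  split
  · next he =>
    have hr : r.reverse.dropWhile pvWS = [] := by simpa using he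
    simp [hr, hc]
  · simp [List.reverse_append]

theorem pvWsSuf_append_cons {c : Char} (hc : ¬ pvWS c) (x r : List Char) :
    pvWsSuf (x ++ c :: r) = pvWsSuf r := by
  unfold pvWsSuf
  rw [List.reverse_append, List.reverse_cons, List.append_assoc, List.takeWhile_append]
  split
  · next he =>
    have hp : r.reverse.takeWhile pvWS = r.reverse := (List.takeWhile_prefix _).eq_of_length he
    simp [hc, hp]
  · rfl

theorem pvRstrip_cons {c : Char} (hc : ¬ pvWS c) (r : List Char) :
    pvRstrip (c :: r) = c :: pvRstrip r := by
  have := pvRstrip_append_cons hc [] r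
  simpa using this

-- the scanner on a comma-free piece ----------------------------------------

-- in-term scan: word grows to word ++ rstrip(pend ++ r)
theorem pvScanT_in (r : List Char) (word pend mode : List Char)
    (hm : mode ≠ []) (hp : pend.all pvWS) :
    r.foldl pvStepT (word, pend, mode)
      = (word ++ pvRstrip (pend ++ r), pvWsSuf (pend ++ r), mode) := by
  induction r generalizing word pend with
  | nil =>
    simp [pvRstrip_all_ws hp, pvWsSuf_all_ws hp]
  | cons c r' ih =>
    simp only [List.foldl_cons]
    by_cases hw : pvWS c
    · have hstep : pvStepT (word, pend, mode) c = (word, pend ++ [c], mode) := by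
        simp [pvStepT, hw, hm]
      rw [hstep, ih word (pend ++ [c]) (by simp [List.all_eq_true] at hp ⊢; exact ⟨hp, hw⟩)]
      simp
    · have hstep : pvStepT (word, pend, mode) c = (word ++ pend ++ [c], [], mode) := by
        simp [pvStepT, hw, hm]
      rw [hstep, ih (word ++ pend ++ [c]) [] (by simp)]
      rw [pvRstrip_append_cons hw pend r', pvWsSuf_append_cons hw pend r']
      simp

-- fresh scan skips leading whitespace
theorem pvScanT_fresh_ws (r : List Char) :
    r.foldl pvStepT ([], [], []) = (r.dropWhile pvWS).foldl pvStepT ([], [], []) := by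
  induction r with
  | nil => rfl
  | cons c r' ih =>
    by_cases hw : pvWS c
    · have hstep : pvStepT ([], [], []) c = ([], [], []) := by simp [pvStepT, hw]
      simp only [List.foldl_cons, hstep, List.dropWhile_cons, hw, if_pos]
      exact ih
    · simp [hw]

-- Chars.strip at the proof level
theorem pvStrip_eq (p : List Char) :
    PySem.Chars.strip p = pvRstrip (p.dropWhile pvWS) := rfl

-- classification agreement on a whole piece (',' is an ordinary character for both sides here)
theorem pvCommit_scan_eq_AStep (p : List Char)
    (acc : List String × List String × List String) :
    pvCommit acc (p.foldl pvStepT ([], [], [])) = pvAStep acc p := by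
  rw [pvScanT_fresh_ws]
  cases hq : p.dropWhile pvWS with
  | nil =>
    simp only [List.foldl_nil, pvCommit, pvAStep, pvStrip_eq, hq]
    norm_num [pvRstrip]
  | cons c rest =>
    have hc : ¬ pvWS c := by
      have hne : p.dropWhile pvWS ≠ [] := by simp [hq]
      have h2 := List.head_dropWhile_not pvWS hne
      simp only [hq, List.head_cons] at h2
      simp [h2]
    simp only [List.foldl_cons]
    have ht : PySem.Chars.strip p = c :: pvRstrip rest := by
      rw [pvStrip_eq, hq, pvRstrip_cons hc]
    by_cases hpm : c = '+' ∨ c = '-'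
    · have hci : ¬ (([c] : List Char) = ['i']) := by rcases hpm with rfl | rfl <;> simp
      have hstep : pvStepT ([], [], []) c = ([], [], [c]) := by
        simp [pvStepT, hc, hpm, hci]
      rw [hstep, pvScanT_in rest [] [] [c] (by simp) (by simp)]
      rcases hpm with rfl | rfl <;>
        simp [pvCommit, pvAStep, ht, PySem.List.pyGet?, PySem.List.pyIdx?]
    · have hstep : pvStepT ([], [], []) c = ([c], [], ['i']) := by
        simp [pvStepT, hc, hpm]
      rw [hstep, pvScanT_in rest [c] [] ['i'] (by simp) (by simp)]
      rw [not_or] at hpm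
      simp [pvCommit, pvAStep, ht, PySem.List.pyGet?, PySem.List.pyIdx?, hpm.1, hpm.2]

-- main induction ------------------------------------------------------------

theorem pvMachine (r : List Char) (acc : List String × List String × List String)
    (ts : List Char × List Char × List Char) (h : List Char) (t : List (List Char))
    (hs : pvSplit r = h :: t) :
    ((r ++ [',']).foldl pvBStep (acc, ts)).1
      = t.foldl pvAStep (pvCommit acc ((h.foldl pvStepT ts))) := by
  induction r generalizing acc ts h t with
  | nil =>
    simp only [pvSplit] at hs
    injection hs with h1 h2
    subst h1; subst h2
    simp [pvBStep_comma]
  | cons c r' ih =>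
    by_cases hc : c = ','
    · subst hc
      obtain ⟨h', t', hs'⟩ : ∃ h' t', pvSplit r' = h' :: t' := by
        cases hh : pvSplit r' with
        | nil => exact absurd hh (pvSplit_ne_nil _)
        | cons a b => exact ⟨a, b, rfl⟩
      simp only [pvSplit, if_true] at hs
      injection hs with h1 h2
      subst h1; subst h2
      simp only [List.cons_append, List.foldl_cons, pvBStep_comma]
      rw [ih (pvCommit acc ts) ([], [], []) h' t' hs']
      rw [hs']
      simp only [List.foldl_nil, List.foldl_cons]
      rw [pvCommit_scan_eq_AStep h' (pvCommit acc ts)]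
    · obtain ⟨h', t', hs'⟩ : ∃ h' t', pvSplit r' = h' :: t' := by
        cases hh : pvSplit r' with
        | nil => exact absurd hh (pvSplit_ne_nil _)
        | cons a b => exact ⟨a, b, rfl⟩
      simp only [pvSplit, if_neg hc, hs'] at hs
      injection hs with h1 h2
      subst h1; subst h2
      simp only [List.cons_append, List.foldl_cons]
      rw [pvBStep_ne acc ts c hc]
      exact ih acc (pvStepT ts c) h' t' hs'

-- A port at the char level ---------------------------------------------------

theorem pvAStep_ofList (acc : List String × List String × List String) (p : List Char) :
    (fun (acc : List String × List String × List String) term0 =>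
      let term := PySem.Str.strip term0
      if term = "" then acc
      else if PySem.Str.pyGet? term 0 = some '-' then
        (acc.1, acc.2.1 ++ [PySem.Str.slice term (some 1) none], acc.2.2)
      else if PySem.Str.pyGet? term 0 = some '+' then
        (acc.1, acc.2.1, acc.2.2 ++ [PySem.Str.slice term (some 1) none])
      else (acc.1 ++ [term], acc.2.1, acc.2.2)) acc (String.ofList p)
      = pvAStep acc p := by
  simp only [pvAStep, PySem.Str.strip, PySem.Str.pyGet?, PySem.Str.slice, String.toList_ofList,
    PySem.Chars.pyGet?, PySem.Chars.slice, PySem.List.slice_from_one]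
  have hempty : (String.ofList (PySem.Chars.strip p) = "") ↔ (PySem.Chars.strip p = []) := by
    constructor
    · intro hh
      have := congrArg String.toList hh
      simpa using this
    · intro hh; rw [hh]
  by_cases h0 : PySem.Chars.strip p = []
  all_goals simp [h0, hempty]

theorem pvA_chars (query : String) :
    parse_search_terms query = (pvSplit query.toList).foldl pvAStep ([], [], []) := by
  unfold parse_search_terms
  have hsplit : pySplitComma query = (pvSplit query.toList).map String.ofList := by
    unfold pySplitComma
    simp [PySem.Str.split?, PySem.Chars.split?, pvSplitOn_eq]
  rw [hsplit, List.foldl_map]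
  simp only [pvAStep_ofList]

theorem pvB_chars (query : String) :
    parse_search_terms_alt query
      = ((query.toList ++ [',']).foldl pvBStep (([], [], []), [], [], [])).1 := rfl

-- ===== VERDICT (by name: the statement is the Claim_ definition above) =====
theorem parse_search_terms_spec : Claim_equal_parse_search_terms := by
  intro query _
  show parse_search_terms query = parse_search_terms_alt query
  obtain ⟨h, t, hs⟩ : ∃ h t, pvSplit query.toList = h :: t := by
    cases hh : pvSplit query.toList with
    | nil => exact absurd hh (pvSplit_ne_nil _)
    | cons a b => exact ⟨a, b, rfl⟩
  rw [pvA_chars, pvB_chars, pvMachine query.toList ([],[],[]) ([],[],[]) h t hs, hs,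
      List.foldl_cons, pvCommit_scan_eq_AStep h ([],[],[])]
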